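-- pv_equiv track=rewrite | github.com/sebastian-blandon/metaheuristicasMIOE | src/2D_Sara/2D-BPP/bin_pack_bl.py | bin_pack_bl
-- ===== SOURCE A (Python) =====
-- def bin_pack_bl(items, bin_capacity):
--     """
--     Packs items into a single bin using the Modified Bottom-Left (BL) algorithm with no item rotation.
--
--     Args:
--         items: A list of tuples representing items (width, height).
--         bin_capacity: The capacity (area) of the bin.
--
--     Returns:
--         A tuple representing the single bin:
--             (occupied_area, usable_empty_space, non_adjacent_area, bin_items, block_matrix).
--     """
--
--     bin_items = []  # Items placed in the bin
--     current_occupied_area = 0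
--     block_matrix = [[0 for _ in range(bin_capacity[0])] for _ in range(bin_capacity[1])]
--
--     sorted_items = items
--
--     for item in sorted_items:
--         item_width, item_height = item
--
--         placed = False
--         for y in range(bin_capacity[1]):
--             for x in range(bin_capacity[0]):
--                 bottom_left = (x, y)
--                 if x + item_width <= bin_capacity[0] and y + item_height <= bin_capacity[1]:
--                     if can_place(bin_items, bottom_left, item):
--                         current_occupied_area += item_width * item_height
--                         bin_items.append((bottom_left[0], bottom_left[1], item_width, item_height))
--                         placed = True
--
--                         # Update block matrix
--                         for i in range(item_height):
--                             for j in range(item_width):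
--                                 block_matrix[y + i][x + j] = 1
--
--                         break
--             if placed:
--                 break
--
--     usable_empty_space_Area =  count_zeros(block_matrix)
--
--
--     return (usable_empty_space_Area,current_occupied_area, bin_items)
--
-- def can_place(bin_items, bottom_left, item):
--     """
--     Checks if an item can be placed at the given bottom-left corner
--     without overlapping existing items in the bin.
--
--     Args:
--         bin_items: A list of tuples representing bottom-left corner coordinates
--                    and dimensions of already placed items in the bin.
--         bottom_left: A tuple representing the bottom-left corner coordinate
--                      where the item is to be placed.
--         item: A tuple representing the item's dimensions (width, height).
--
--     Returns:
--         True if the item can be placed without overlap, False otherwise.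
--     """
--     item_width, item_height = item
--     item_right = bottom_left[0] + item_width
--     item_top = bottom_left[1] + item_height
--
--     for x, y, width, height in bin_items:
--         if (x < item_right and x + width > bottom_left[0] and
--                 y < item_top and y + height > bottom_left[1]):
--             return False
--     return True
--
-- def count_zeros(matrix):
--     count = 0
--     for row in matrix:
--         for i in range(len(row) - 1, -1, -1):  # Iterate from right to left
--             if row[i] == 0:
--                 count += 1
--             else:
--                 break  # Exit the loop when encountering a one
--     return count
-- ===== SOURCE B (Python) =====
-- def bin_pack_bl(items, bin_capacity):
--     """Modified Bottom-Left packing re-implemented without the occupancy matrix: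
--     the first-fit position is searched only among sorted candidate corner
--     coordinates (x among right edges, y among top edges of placed items, plus 0),
--     and the usable-empty-space count is computed per row from the placed
--     rectangles instead of scanning a block matrix."""
--     W, H = bin_capacity
--     placed = []
--     occupied = 0
--     for (w, h) in items:
--         ys = sorted(set([0] + [py + ph for (_px, py, _pw, ph) in placed]))
--         xs = sorted(set([0] + [px + pw for (px, _py, pw, _ph) in placed]))
--         best = None
--         for y in ys:
--             if 0 <= y < H and y + h <= H:
--                 for x in xs:
--                     if 0 <= x < W and x + w <= W and _no_overlap(placed, x, y, w, h):
--                         best = (y, x)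
--                         break
--             if best is not None:
--                 break
--         if best is not None:
--             y, x = best
--             placed.append((x, y, w, h))
--             occupied += w * h
--     width = max(W, 0)
--     usable = 0
--     for y in range(H):
--         right = 0
--         for (px, py, pw, ph) in placed:
--             if py <= y < py + ph and pw >= 1:
--                 right = max(right, px + pw)
--         usable += width - right
--     return (usable, occupied, placed)
--
--
-- def _no_overlap(placed, x, y, w, h):
--     return not any(px < x + w and px + pw > x and py < y + h and py + ph > y
--                    for (px, py, pw, ph) in placed)
-- ===== Notes on version B (the rewrite author's own statement) =====
-- stated objective: faster
-- what changed: B finds each item's bottom-left position by scanning only the sorted candidate corner coordinates (x among right edges, y among top edges of placed items, plus 0) instead of scanning every (x, y) cell of the bin, and computes the usable empty space per row from the placed rectangles instead of building and scanning a W×H block matrix.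
import Mathlib
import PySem

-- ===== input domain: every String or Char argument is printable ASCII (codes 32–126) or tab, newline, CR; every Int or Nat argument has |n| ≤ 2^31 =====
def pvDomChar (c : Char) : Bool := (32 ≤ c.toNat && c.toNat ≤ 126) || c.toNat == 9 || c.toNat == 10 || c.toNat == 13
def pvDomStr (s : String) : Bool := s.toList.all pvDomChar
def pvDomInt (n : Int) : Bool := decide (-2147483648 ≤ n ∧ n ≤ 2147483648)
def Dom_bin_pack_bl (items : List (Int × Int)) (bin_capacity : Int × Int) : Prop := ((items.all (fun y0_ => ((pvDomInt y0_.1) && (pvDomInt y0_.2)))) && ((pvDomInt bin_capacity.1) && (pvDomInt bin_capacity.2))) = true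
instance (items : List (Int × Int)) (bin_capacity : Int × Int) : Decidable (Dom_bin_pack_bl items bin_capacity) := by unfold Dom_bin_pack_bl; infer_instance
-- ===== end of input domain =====

-- B replaces A's per-item scan of every bin cell by a scan of sorted candidate corner
-- coordinates and computes the empty-space count per row from the placed rectangles
-- instead of maintaining a W×H block matrix (objective: faster).

-- ===== PORT A =====

-- can_place: loop over bin_items with early `return False`
def aCanPlace : List (Int × Int × Int × Int) → (Int × Int) → (Int × Int) → Bool
  | [], _, _ => true
  | p :: rest, bl, it =>
    if p.1 < bl.1 + it.1 ∧ p.1 + p.2.2.1 > bl.1 ∧ p.2.1 < bl.2 + it.2 ∧ p.2.1 + p.2.2.2 > bl.2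
    then false else aCanPlace rest bl it

-- the inner `for x in range(...)` loop with its two-stage test and `break`
def aGoX (binItems : List (Int × Int × Int × Int)) (W H w h y : Int) : List Int → Option Int
  | [] => none
  | x :: xs =>
    if x + w ≤ W ∧ y + h ≤ H then
      if aCanPlace binItems (x, y) (w, h) then some x else aGoX binItems W H w h y xs
    else aGoX binItems W H w h y xs

-- the outer `for y in range(...)` loop with the `placed` flag / `break`
def aGoY (binItems : List (Int × Int × Int × Int)) (W H w h : Int) : List Int → Option (Int × Int)
  | [] => none
  | y :: ys =>
    match aGoX binItems W H w h y (PySem.List.pyRange 0 W 1) with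
    | some x => some (x, y)
    | none => aGoY binItems W H w h ys

-- block_matrix[r][c] = 1 ; the indices used are always in range and ≥ 0, so
-- `toNat` + `modify`/`set` is exactly Python's in-range list assignment
def aSetOne (m : List (List Int)) (r c : Int) : List (List Int) :=
  m.modify r.toNat (fun row => row.set c.toNat 1)

-- the nested `for i in range(item_height): for j in range(item_width)` update
def aMark (m : List (List Int)) (x y w h : Int) : List (List Int) :=
  (PySem.List.pyRange 0 h 1).foldl (fun mm i =>
    (PySem.List.pyRange 0 w 1).foldl (fun mm2 j => aSetOne mm2 (y + i) (x + j)) mm) m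

-- count_zeros' inner loop: `for i in range(len(row)-1, -1, -1)` with `break`;
-- every index i is in range, so `pyGetD row i 0` is exactly `row[i]`
def aTzGo (row : List Int) : List Int → Int
  | [] => 0
  | i :: rest => if PySem.List.pyGetD row i 0 == 0 then 1 + aTzGo row rest else 0

def aCountZeros (m : List (List Int)) : Int :=
  m.foldl (fun cnt row => cnt + aTzGo row (PySem.List.pyRange ((row.length : Int) - 1) (-1) (-1))) 0

-- one iteration of `for item in sorted_items`
def aStep (W H : Int) (st : List (Int × Int × Int × Int) × Int × List (List Int))
    (item : Int × Int) : List (Int × Int × Int × Int) × Int × List (List Int) :=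
  match aGoY st.1 W H item.1 item.2 (PySem.List.pyRange 0 H 1) with
  | none => st
  | some xy => (st.1 ++ [(xy.1, xy.2, item.1, item.2)], st.2.1 + item.1 * item.2,
                aMark st.2.2 xy.1 xy.2 item.1 item.2)

def bin_pack_bl (items : List (Int × Int)) (bin_capacity : Int × Int) :
    Int × Int × (List (Int × Int × Int × Int)) :=
  let st := items.foldl (aStep bin_capacity.1 bin_capacity.2)
      ([], 0, List.replicate bin_capacity.2.toNat (List.replicate bin_capacity.1.toNat 0))
  (aCountZeros st.2.2, st.2.1, st.1)

-- ===== PORT B =====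

-- _no_overlap's `any(...)` generator
def bOverlap (placed : List (Int × Int × Int × Int)) (x y w h : Int) : Bool :=
  placed.any (fun p =>
    decide (p.1 < x + w ∧ p.1 + p.2.2.1 > x ∧ p.2.1 < y + h ∧ p.2.1 + p.2.2.2 > y))

-- sorted(set([0] + [py + ph ...])) / sorted(set([0] + [px + pw ...]))
def bYs (placed : List (Int × Int × Int × Int)) : List Int :=
  PySem.List.sorted (PySem.Set.ofList (0 :: placed.map (fun p => p.2.1 + p.2.2.2))) (fun v => v)

def bXs (placed : List (Int × Int × Int × Int)) : List Int :=
  PySem.List.sorted (PySem.Set.ofList (0 :: placed.map (fun p => p.1 + p.2.2.1))) (fun v => v)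

-- `for x in xs` with `break` at the first fitting x
def bFindX (placed : List (Int × Int × Int × Int)) (W w h y : Int) : List Int → Option Int
  | [] => none
  | x :: xs =>
    if (0 ≤ x ∧ x < W ∧ x + w ≤ W) ∧ bOverlap placed x y w h = false then some x
    else bFindX placed W w h y xs

-- `for y in ys` with the bounds filter and `break` once best is set
def bFindY (placed : List (Int × Int × Int × Int)) (W H w h : Int) (xs : List Int) :
    List Int → Option (Int × Int)
  | [] => none
  | y :: ys =>
    if 0 ≤ y ∧ y < H ∧ y + h ≤ H then
      match bFindX placed W w h y xs with
      | some x => some (y, x)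
      | none => bFindY placed W H w h xs ys
    else bFindY placed W H w h xs ys

def bStep (W H : Int) (st : List (Int × Int × Int × Int) × Int) (item : Int × Int) :
    List (Int × Int × Int × Int) × Int :=
  match bFindY st.1 W H item.1 item.2 (bXs st.1) (bYs st.1) with
  | none => st
  | some yx => (st.1 ++ [(yx.2, yx.1, item.1, item.2)], st.2 + item.1 * item.2)

-- the `right = max(right, px + pw)` accumulator of one row
def bRight (placed : List (Int × Int × Int × Int)) (y : Int) : Int :=
  placed.foldl (fun r p =>
    if p.2.1 ≤ y ∧ y < p.2.1 + p.2.2.2 ∧ 1 ≤ p.2.2.1 then max r (p.1 + p.2.2.1) else r) 0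

-- `for y in range(H): usable += width - right`
def bUsable (placed : List (Int × Int × Int × Int)) (W H : Int) : Int :=
  (PySem.List.pyRange 0 H 1).foldl (fun u y => u + (max W 0 - bRight placed y)) 0

def bin_pack_bl_alt (items : List (Int × Int)) (bin_capacity : Int × Int) :
    Int × Int × (List (Int × Int × Int × Int)) :=
  let st := items.foldl (bStep bin_capacity.1 bin_capacity.2) ([], 0)
  (bUsable st.1 bin_capacity.1 bin_capacity.2, st.2, st.1)

-- ===== PRECONDITION & SPEC =====
def Spec_bin_pack_bl (items : List (Int × Int)) (bin_capacity : Int × Int) (out : Int × Int × (List (Int × Int × Int × Int))) : Prop := out = bin_pack_bl_alt items bin_capacity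
instance (items : List (Int × Int)) (bin_capacity : Int × Int) (out : Int × Int × (List (Int × Int × Int × Int))) : Decidable (Spec_bin_pack_bl items bin_capacity out) := by unfold Spec_bin_pack_bl; infer_instance

-- ===== CLAIM (what is proved, stated in full; the proofs are below) =====
def Claim_equal_bin_pack_bl : Prop := ∀ (items : List (Int × Int)) (bin_capacity : Int × Int), Dom_bin_pack_bl items bin_capacity → Spec_bin_pack_bl items bin_capacity (bin_pack_bl items bin_capacity)

-- ===== LEMMAS AND PROOFS =====

-- the overlap relation both overlap tests decide
def OV (p : Int × Int × Int × Int) (x y w h : Int) : Prop :=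
  p.1 < x + w ∧ x < p.1 + p.2.2.1 ∧ p.2.1 < y + h ∧ y < p.2.1 + p.2.2.2

-- a feasible placement position for an item (w, h)
def Feas (placed : List (Int × Int × Int × Int)) (W H w h y x : Int) : Prop :=
  0 ≤ y ∧ y < H ∧ y + h ≤ H ∧ 0 ≤ x ∧ x < W ∧ x + w ≤ W ∧ ∀ p ∈ placed, ¬ OV p x y w h

-- a feasible position whose coordinates are candidate corner coordinates
def CFeas (placed : List (Int × Int × Int × Int)) (W H w h y x : Int) : Prop :=
  y ∈ bYs placed ∧ x ∈ bXs placed ∧ Feas placed W H w h y x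

-- placed rectangles lie (strictly started) inside the bin
def Inb (placed : List (Int × Int × Int × Int)) (W H : Int) : Prop :=
  ∀ p ∈ placed, 0 ≤ p.1 ∧ p.1 < W ∧ p.1 + p.2.2.1 ≤ W ∧ 0 ≤ p.2.1 ∧ p.2.1 < H ∧ p.2.1 + p.2.2.2 ≤ H

def cell (m : List (List Int)) (r c : Nat) : Int := ((m[r]?.getD [])[c]?).getD 0

def rowLen (m : List (List Int)) (i : Nat) : Nat := (m[i]?.getD []).length

-- the block matrix is the indicator matrix of the placed rectangles
def ReprM (m : List (List Int)) (placed : List (Int × Int × Int × Int)) (W H : Int) : Prop :=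
  m.length = H.toNat ∧ (∀ i : Nat, i < H.toNat → rowLen m i = W.toNat) ∧
  ∀ r c : Nat, r < H.toNat → c < W.toNat →
    cell m r c = if ∃ p ∈ placed, p.1 ≤ (c : Int) ∧ (c : Int) < p.1 + p.2.2.1 ∧
        p.2.1 ≤ (r : Int) ∧ (r : Int) < p.2.1 + p.2.2.2 then 1 else 0

def InvAB (stA : List (Int × Int × Int × Int) × Int × List (List Int))
    (stB : List (Int × Int × Int × Int) × Int) (W H : Int) : Prop :=
  stA.1 = stB.1 ∧ stA.2.1 = stB.2 ∧ ReprM stA.2.2 stA.1 W H ∧ Inb stA.1 W H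

theorem aCanPlace_iff (placed : List (Int × Int × Int × Int)) (x y w h : Int) :
    aCanPlace placed (x, y) (w, h) = true ↔ ∀ p ∈ placed, ¬ OV p x y w h := by
  induction placed with
  | nil => simp [aCanPlace]
  | cons p rest ih =>
    simp only [aCanPlace, OV, List.mem_cons]
    split_ifs with hp
    · simp only [Bool.false_eq_true, false_iff]
      push_neg
      exact ⟨p, Or.inl rfl, by omega⟩
    · rw [ih]
      constructor
      · rintro hall q (rfl | hq)
        · omega
        · exact hall q hq
      · intro hall q hq
        exact hall q (Or.inr hq)

theorem bOverlap_iff (placed : List (Int × Int × Int × Int)) (x y w h : Int) :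
    bOverlap placed x y w h = false ↔ ∀ p ∈ placed, ¬ OV p x y w h := by
  simp only [bOverlap, List.any_eq_false, decide_eq_true_eq, OV]

theorem find?_min {l : List Int} (hl : l.Pairwise (· < ·)) {p : Int → Bool} {a : Int}
    (h : l.find? p = some a) : ∀ b ∈ l, p b = true → a ≤ b := by
  induction l with
  | nil => simp at h
  | cons c l ih =>
    rw [List.find?_cons] at h
    rcases List.pairwise_cons.mp hl with ⟨hlt, hl'⟩
    cases hpc : p c with
    | true =>
      rw [hpc] at h
      simp only [Option.some.injEq] at h
      subst h
      intro b hb _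
      rcases List.mem_cons.mp hb with rfl | hb
      · exact le_refl b
      · exact le_of_lt (hlt b hb)
    | false =>
      rw [hpc] at h
      intro b hb hpb
      rcases List.mem_cons.mp hb with rfl | hb
      · rw [hpc] at hpb; exact absurd hpb (by simp)
      · exact ih hl' h b hb hpb

theorem aGoX_eq_find? (placed : List (Int × Int × Int × Int)) (W H w h y : Int) (xs : List Int) :
    aGoX placed W H w h y xs =
      xs.find? (fun x => decide (x + w ≤ W ∧ y + h ≤ H) && aCanPlace placed (x, y) (w, h)) := by
  induction xs with
  | nil => rfl
  | cons x xs ih =>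
    rw [List.find?_cons]
    simp only [aGoX]
    split_ifs with h1 h2
    · simp [h1, h2]
    · simp [h1, h2, ih]
    · simp [h1, ih]

theorem bFindX_eq_find? (placed : List (Int × Int × Int × Int)) (W w h y : Int) (xs : List Int) :
    bFindX placed W w h y xs =
      xs.find? (fun x => decide ((0 ≤ x ∧ x < W ∧ x + w ≤ W) ∧ bOverlap placed x y w h = false)) := by
  induction xs with
  | nil => rfl
  | cons x xs ih =>
    rw [List.find?_cons]
    simp only [bFindX]
    split_ifs with h1
    · simp [h1]
    · simp [h1, ih]

theorem aGoY_none_iff (placed : List (Int × Int × Int × Int)) (W H w h : Int) (ys : List Int) :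
    aGoY placed W H w h ys = none ↔
      ∀ y ∈ ys, aGoX placed W H w h y (PySem.List.pyRange 0 W 1) = none := by
  induction ys with
  | nil => simp [aGoY]
  | cons y ys ih =>
    simp only [aGoY]
    cases hgx : aGoX placed W H w h y (PySem.List.pyRange 0 W 1) with
    | some x => simp [hgx]
    | none => simpa [hgx] using ih

theorem aGoY_some (placed : List (Int × Int × Int × Int)) (W H w h : Int) {ys : List Int}
    (hys : ys.Pairwise (· < ·)) {xy : Int × Int} (hres : aGoY placed W H w h ys = some xy) :
    xy.2 ∈ ys ∧ aGoX placed W H w h xy.2 (PySem.List.pyRange 0 W 1) = some xy.1 ∧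
      ∀ y' ∈ ys, y' < xy.2 → aGoX placed W H w h y' (PySem.List.pyRange 0 W 1) = none := by
  induction ys with
  | nil => simp [aGoY] at hres
  | cons y ys ih =>
    rcases List.pairwise_cons.mp hys with ⟨hlt, hys'⟩
    simp only [aGoY] at hres
    cases hgx : aGoX placed W H w h y (PySem.List.pyRange 0 W 1) with
    | some x =>
      rw [hgx] at hres
      simp only [Option.some.injEq] at hres
      subst hres
      refine ⟨List.mem_cons_self, hgx, ?_⟩
      intro y' hy' hlt'
      rcases List.mem_cons.mp hy' with rfl | hy'
      · omega
      · exact absurd (hlt y' hy') (by omega)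
    | none =>
      rw [hgx] at hres
      obtain ⟨hmem, hfound, hmin⟩ := ih hys' hres
      refine ⟨List.mem_cons_of_mem _ hmem, hfound, ?_⟩
      intro y' hy' hlt'
      rcases List.mem_cons.mp hy' with rfl | hy'
      · exact hgx
      · exact hmin y' hy' hlt'

theorem bFindY_none_iff (placed : List (Int × Int × Int × Int)) (W H w h : Int)
    (xs ys : List Int) :
    bFindY placed W H w h xs ys = none ↔
      ∀ y ∈ ys, (0 ≤ y ∧ y < H ∧ y + h ≤ H) → bFindX placed W w h y xs = none := by
  induction ys with
  | nil => simp [bFindY]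
  | cons y ys ih =>
    simp only [bFindY]
    split_ifs with hfil
    · cases hgx : bFindX placed W w h y xs with
      | some x =>
        simp only [hgx]
        simp only [reduceCtorEq, false_iff]
        push_neg
        exact ⟨y, List.mem_cons_self, hfil, by simp [hgx]⟩
      | none =>
        simp only [hgx]
        rw [ih]
        constructor
        · intro hall y' hy' hf
          rcases List.mem_cons.mp hy' with rfl | hy'
          · exact hgx
          · exact hall y' hy' hf
        · intro hall y' hy' hf
          exact hall y' (List.mem_cons_of_mem _ hy') hf
    · rw [ih]
      constructor
      · intro hall y' hy' hf
        rcases List.mem_cons.mp hy' with rfl | hy'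
        · exact absurd hf hfil
        · exact hall y' hy' hf
      · intro hall y' hy' hf
        exact hall y' (List.mem_cons_of_mem _ hy') hf

theorem bFindY_some (placed : List (Int × Int × Int × Int)) (W H w h : Int) (xs : List Int)
    {ys : List Int} (hys : ys.Pairwise (· < ·)) {yx : Int × Int}
    (hres : bFindY placed W H w h xs ys = some yx) :
    yx.1 ∈ ys ∧ (0 ≤ yx.1 ∧ yx.1 < H ∧ yx.1 + h ≤ H) ∧ bFindX placed W w h yx.1 xs = some yx.2 ∧
      ∀ y' ∈ ys, y' < yx.1 → (0 ≤ y' ∧ y' < H ∧ y' + h ≤ H) →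
        bFindX placed W w h y' xs = none := by
  induction ys with
  | nil => simp [bFindY] at hres
  | cons y ys ih =>
    rcases List.pairwise_cons.mp hys with ⟨hlt, hys'⟩
    simp only [bFindY] at hres
    split_ifs at hres with hfil
    · cases hgx : bFindX placed W w h y xs with
      | some x =>
        rw [hgx] at hres
        simp only [Option.some.injEq] at hres
        subst hres
        refine ⟨List.mem_cons_self, hfil, hgx, ?_⟩
        intro y' hy' hlt' _
        rcases List.mem_cons.mp hy' with rfl | hy'
        · omega
        · exact absurd (hlt y' hy') (by omega)
      | none =>
        rw [hgx] at hres
        obtain ⟨hmem, hf, hfound, hmin⟩ := ih hys' hres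
        refine ⟨List.mem_cons_of_mem _ hmem, hf, hfound, ?_⟩
        intro y' hy' hlt' hf'
        rcases List.mem_cons.mp hy' with rfl | hy'
        · exact hgx
        · exact hmin y' hy' hlt' hf'
    · obtain ⟨hmem, hf, hfound, hmin⟩ := ih hys' hres
      refine ⟨List.mem_cons_of_mem _ hmem, hf, hfound, ?_⟩
      intro y' hy' hlt' hf'
      rcases List.mem_cons.mp hy' with rfl | hy'
      · exact absurd hf' hfil
      · exact hmin y' hy' hlt' hf'

theorem mem_bYs (placed : List (Int × Int × Int × Int)) (v : Int) :
    v ∈ bYs placed ↔ v = 0 ∨ ∃ p ∈ placed, v = p.2.1 + p.2.2.2 := by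
  simp only [bYs, PySem.List.mem_sorted, PySem.Set.mem_ofList, List.mem_cons, List.mem_map]
  constructor
  · rintro (rfl | ⟨p, hp, rfl⟩)
    · exact Or.inl rfl
    · exact Or.inr ⟨p, hp, rfl⟩
  · rintro (rfl | ⟨p, hp, rfl⟩)
    · exact Or.inl rfl
    · exact Or.inr ⟨p, hp, rfl⟩

theorem mem_bXs (placed : List (Int × Int × Int × Int)) (v : Int) :
    v ∈ bXs placed ↔ v = 0 ∨ ∃ p ∈ placed, v = p.1 + p.2.2.1 := by
  simp only [bXs, PySem.List.mem_sorted, PySem.Set.mem_ofList, List.mem_cons, List.mem_map]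
  constructor
  · rintro (rfl | ⟨p, hp, rfl⟩)
    · exact Or.inl rfl
    · exact Or.inr ⟨p, hp, rfl⟩
  · rintro (rfl | ⟨p, hp, rfl⟩)
    · exact Or.inl rfl
    · exact Or.inr ⟨p, hp, rfl⟩

-- the lexicographically least feasible position sits on candidate corner coordinates
theorem min_mem_cands (placed : List (Int × Int × Int × Int)) (W H w h y x : Int)
    (hf : Feas placed W H w h y x)
    (hmin : ∀ y' x', Feas placed W H w h y' x' → y < y' ∨ (y = y' ∧ x ≤ x')) :
    y ∈ bYs placed ∧ x ∈ bXs placed := by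
  obtain ⟨hy0, hyH, hyhH, hx0, hxW, hxwW, hov⟩ := hf
  constructor
  · rw [mem_bYs]
    by_cases hy : y = 0
    · exact Or.inl hy
    · have hnf : ¬ Feas placed W H w h (y - 1) x := by
        intro hf'
        rcases hmin _ _ hf' with h1 | h2 <;> omega
      unfold Feas at hnf
      push_neg at hnf
      obtain ⟨p, hp, hovp⟩ := hnf (by omega) (by omega) (by omega) hx0 hxW hxwW
      have hnov := hov p hp
      unfold OV at hovp hnov
      refine Or.inr ⟨p, hp, by omega⟩
  · rw [mem_bXs]
    by_cases hx : x = 0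
    · exact Or.inl hx
    · have hnf : ¬ Feas placed W H w h y (x - 1) := by
        intro hf'
        rcases hmin _ _ hf' with h1 | h2 <;> omega
      unfold Feas at hnf
      push_neg at hnf
      obtain ⟨p, hp, hovp⟩ := hnf hy0 hyH hyhH (by omega) (by omega) (by omega)
      have hnov := hov p hp
      unfold OV at hovp hnov
      refine Or.inr ⟨p, hp, by omega⟩

theorem A_spec_none (placed : List (Int × Int × Int × Int)) (W H w h : Int)
    (hres : aGoY placed W H w h (PySem.List.pyRange 0 H 1) = none) :
    ∀ y x, ¬ Feas placed W H w h y x := by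
  intro y x hf
  obtain ⟨hy0, hyH, hyhH, hx0, hxW, hxwW, hov⟩ := hf
  have hall := (aGoY_none_iff placed W H w h _).mp hres y
    (by rw [PySem.List.mem_pyRange_one]; omega)
  rw [aGoX_eq_find?, List.find?_eq_none] at hall
  have := hall x (by rw [PySem.List.mem_pyRange_one]; omega)
  simp only [Bool.and_eq_true, decide_eq_true_eq, not_and] at this
  exact this ⟨hxwW, hyhH⟩ ((aCanPlace_iff placed x y w h).mpr hov)

theorem A_spec_some (placed : List (Int × Int × Int × Int)) (W H w h : Int) {x y : Int}
    (hres : aGoY placed W H w h (PySem.List.pyRange 0 H 1) = some (x, y)) :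
    Feas placed W H w h y x ∧
      ∀ y' x', Feas placed W H w h y' x' → y < y' ∨ (y = y' ∧ x ≤ x') := by
  obtain ⟨hmem, hfound, hmin⟩ :=
    aGoY_some placed W H w h (PySem.List.pairwise_lt_pyRange_one 0 H) (xy := (x, y)) hres
  rw [PySem.List.mem_pyRange_one] at hmem
  rw [aGoX_eq_find?] at hfound
  have hpredx := List.find?_some hfound
  have hxmem := List.mem_of_find?_eq_some hfound
  rw [PySem.List.mem_pyRange_one] at hxmem
  simp only [Bool.and_eq_true, decide_eq_true_eq] at hpredx
  obtain ⟨⟨hxwW, hyhH⟩, hcp⟩ := hpredx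
  have hov := (aCanPlace_iff placed x y w h).mp hcp
  refine ⟨⟨by omega, by omega, hyhH, by omega, by omega, hxwW, hov⟩, ?_⟩
  intro y' x' hf'
  obtain ⟨hy0', hyH', hyhH', hx0', hxW', hxwW', hov'⟩ := hf'
  have hpred' : (decide (x' + w ≤ W ∧ y' + h ≤ H) &&
      aCanPlace placed (x', y') (w, h)) = true := by
    simp only [Bool.and_eq_true, decide_eq_true_eq]
    exact ⟨⟨hxwW', hyhH'⟩, (aCanPlace_iff placed x' y' w h).mpr hov'⟩
  by_cases hlt : y' < y
  · exfalso
    have hnone := hmin y' (by rw [PySem.List.mem_pyRange_one]; omega) hlt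
    rw [aGoX_eq_find?, List.find?_eq_none] at hnone
    exact absurd hpred' (by simpa using hnone x' (by rw [PySem.List.mem_pyRange_one]; omega))
  · by_cases heq : y = y'
    · subst heq
      refine Or.inr ⟨rfl, ?_⟩
      exact find?_min (PySem.List.pairwise_lt_pyRange_one 0 W) hfound x'
        (by rw [PySem.List.mem_pyRange_one]; omega) hpred'
    · exact Or.inl (by omega)

theorem B_spec_none (placed : List (Int × Int × Int × Int)) (W H w h : Int)
    (hres : bFindY placed W H w h (bXs placed) (bYs placed) = none) :
    ∀ y x, ¬ CFeas placed W H w h y x := by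
  intro y x hcf
  obtain ⟨hyc, hxc, hy0, hyH, hyhH, hx0, hxW, hxwW, hov⟩ := hcf
  have hall := (bFindY_none_iff placed W H w h _ _).mp hres y hyc ⟨hy0, hyH, hyhH⟩
  rw [bFindX_eq_find?, List.find?_eq_none] at hall
  have := hall x hxc
  simp only [decide_eq_true_eq, not_and] at this
  exact absurd ((bOverlap_iff placed x y w h).mpr hov) (this ⟨hx0, hxW, hxwW⟩)

theorem B_spec_some (placed : List (Int × Int × Int × Int)) (W H w h : Int) {y x : Int}
    (hres : bFindY placed W H w h (bXs placed) (bYs placed) = some (y, x)) :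
    CFeas placed W H w h y x ∧
      ∀ y' x', CFeas placed W H w h y' x' → y < y' ∨ (y = y' ∧ x ≤ x') := by
  have hpys : (bYs placed).Pairwise (· < ·) := PySem.List.sorted_ofList_pairwise_lt _
  have hpxs : (bXs placed).Pairwise (· < ·) := PySem.List.sorted_ofList_pairwise_lt _
  obtain ⟨hmem, hfil, hfound, hmin⟩ :=
    bFindY_some placed W H w h (bXs placed) hpys (yx := (y, x)) hres
  rw [bFindX_eq_find?] at hfound
  have hpredx := List.find?_some hfound
  have hxmem := List.mem_of_find?_eq_some hfound
  simp only [decide_eq_true_eq] at hpredx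
  obtain ⟨⟨hx0, hxW, hxwW⟩, hno⟩ := hpredx
  have hov := (bOverlap_iff placed x y w h).mp hno
  refine ⟨⟨hmem, hxmem, hfil.1, hfil.2.1, hfil.2.2, hx0, hxW, hxwW, hov⟩, ?_⟩
  intro y' x' hcf'
  obtain ⟨hyc', hxc', hy0', hyH', hyhH', hx0', hxW', hxwW', hov'⟩ := hcf'
  have hpred' : (decide ((0 ≤ x' ∧ x' < W ∧ x' + w ≤ W) ∧
      bOverlap placed x' y' w h = false)) = true := by
    simp only [decide_eq_true_eq]
    exact ⟨⟨hx0', hxW', hxwW'⟩, (bOverlap_iff placed x' y' w h).mpr hov'⟩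
  by_cases hlt : y' < y
  · exfalso
    have hnone := hmin y' hyc' hlt ⟨hy0', hyH', hyhH'⟩
    rw [bFindX_eq_find?, List.find?_eq_none] at hnone
    exact absurd hpred' (by simpa using hnone x' hxc')
  · by_cases heq : y = y'
    · subst heq
      exact Or.inr ⟨rfl, find?_min hpxs hfound x' hxc' hpred'⟩
    · exact Or.inl (by omega)

-- both searches find the same position
theorem search_eq (placed : List (Int × Int × Int × Int)) (W H w h : Int) :
    aGoY placed W H w h (PySem.List.pyRange 0 H 1) =
      (bFindY placed W H w h (bXs placed) (bYs placed)).map (fun yx => (yx.2, yx.1)) := by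
  cases hb : bFindY placed W H w h (bXs placed) (bYs placed) with
  | none =>
    cases ha : aGoY placed W H w h (PySem.List.pyRange 0 H 1) with
    | none => rfl
    | some xy =>
      exfalso
      obtain ⟨hf, hmin⟩ := A_spec_some placed W H w h (x := xy.1) (y := xy.2) (by rw [← ha])
      obtain ⟨hyc, hxc⟩ := min_mem_cands placed W H w h xy.2 xy.1 hf hmin
      exact B_spec_none placed W H w h hb xy.2 xy.1 ⟨hyc, hxc, hf⟩
  | some yx =>
    obtain ⟨hcf, hminB⟩ := B_spec_some placed W H w h (y := yx.1) (x := yx.2) (by rw [← hb])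
    cases ha : aGoY placed W H w h (PySem.List.pyRange 0 H 1) with
    | none =>
      exact absurd hcf.2.2 (A_spec_none placed W H w h ha yx.1 yx.2)
    | some xy =>
      obtain ⟨hf, hminA⟩ := A_spec_some placed W H w h (x := xy.1) (y := xy.2) (by rw [← ha])
      obtain ⟨hyc, hxc⟩ := min_mem_cands placed W H w h xy.2 xy.1 hf hminA
      have h1 := hminA yx.1 yx.2 hcf.2.2
      have h2 := hminB xy.2 xy.1 ⟨hyc, hxc, hf⟩
      simp only [Option.map_some, Option.some.injEq]
      have : xy.2 = yx.1 ∧ xy.1 = yx.2 := by omega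
      rw [Prod.ext_iff]
      exact ⟨this.2, this.1⟩


theorem length_aSetOne (m : List (List Int)) (r c : Int) :
    (aSetOne m r c).length = m.length := List.length_modify ..

theorem rowLen_aSetOne (m : List (List Int)) (r c : Int) (i : Nat) :
    rowLen (aSetOne m r c) i = rowLen m i := by
  unfold rowLen aSetOne
  rw [List.getElem?_modify]
  cases hmi : m[i]? with
  | none => simp
  | some row =>
    simp only [Option.map_eq_map, Option.map_some, Option.getD_some]
    split_ifs <;> simp [List.length_set]

theorem cell_aSetOne (m : List (List Int)) (r0 c0 : Int) (h0r : 0 ≤ r0) (h0c : 0 ≤ c0)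
    (hr0 : r0.toNat < m.length) (hc0 : c0.toNat < rowLen m r0.toNat) (r c : Nat) :
    cell (aSetOne m r0 c0) r c =
      if r = r0.toNat ∧ c = c0.toNat then 1 else cell m r c := by
  unfold cell aSetOne
  rw [List.getElem?_modify]
  by_cases hr : r = r0.toNat
  · subst hr
    have hmi : m[r0.toNat]? = some (m[r0.toNat]'hr0) := List.getElem?_eq_getElem hr0
    rw [hmi]
    simp only [Option.map_eq_map, Option.map_some, Option.getD_some, if_true,
      true_and, List.getElem?_set]
    unfold rowLen at hc0
    rw [hmi] at hc0
    simp only [Option.getD_some] at hc0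
    by_cases hc : c0.toNat = c
    · rw [if_pos hc, if_pos (hc ▸ hc0), if_pos hc.symm]
      rfl
    · rw [if_neg hc, if_neg (fun hcc : c = c0.toNat => hc hcc.symm)]
  · rw [if_neg (fun hp => hr hp.1)]
    cases hmi : m[r]? with
    | none => rfl
    | some row =>
      simp only [Option.map_eq_map, Option.map_some, Option.getD_some,
        if_neg (fun h : r0.toNat = r => hr h.symm)]

theorem shape_foldl_setOne (l : List Int) (g f : Int → Int) (m : List (List Int)) :
    (l.foldl (fun mm j => aSetOne mm (g j) (f j)) m).length = m.length ∧
      ∀ i : Nat, rowLen (l.foldl (fun mm j => aSetOne mm (g j) (f j)) m) i = rowLen m i := by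
  induction l generalizing m with
  | nil => simp
  | cons a l ih =>
    simp only [List.foldl_cons]
    obtain ⟨h1, h2⟩ := ih (aSetOne m (g a) (f a))
    exact ⟨h1.trans (length_aSetOne ..), fun i => (h2 i).trans (rowLen_aSetOne ..)⟩

theorem length_aMark (m : List (List Int)) (x y w h : Int) :
    (aMark m x y w h).length = m.length ∧ ∀ i : Nat, rowLen (aMark m x y w h) i = rowLen m i := by
  unfold aMark
  generalize PySem.List.pyRange 0 h 1 = l
  induction l generalizing m with
  | nil => simp
  | cons a l ih =>
    simp only [List.foldl_cons]
    obtain ⟨h1, h2⟩ := ih ((PySem.List.pyRange 0 w 1).foldl (fun mm2 j => aSetOne mm2 (y + a) (x + j)) m)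
    obtain ⟨g1, g2⟩ := shape_foldl_setOne (PySem.List.pyRange 0 w 1) (fun _ => y + a) (fun j => x + j) m
    exact ⟨h1.trans g1, fun i => (h2 i).trans (g2 i)⟩

theorem cell_markRow (n : Nat) (m : List (List Int)) (x yy : Int) (Wn : Nat) (hx : 0 ≤ x)
    (hyy : 0 ≤ yy) (hyr : yy.toNat < m.length) (hW : rowLen m yy.toNat = Wn)
    (hxn : x + n ≤ (Wn : Int)) (r c : Nat) :
    cell ((PySem.List.pyRange 0 (n : Int) 1).foldl (fun mm j => aSetOne mm yy (x + j)) m) r c =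
      if r = yy.toNat ∧ x ≤ (c : Int) ∧ (c : Int) < x + n then 1 else cell m r c := by
  induction n with
  | zero =>
    rw [show ((0 : Nat) : Int) = 0 by rfl, PySem.List.pyRange_one_eq_nil (by omega)]
    simp only [List.foldl_nil]
    rw [if_neg (by omega)]
  | succ n ih =>
    rw [show ((n + 1 : Nat) : Int) = (n : Int) + 1 by push_cast; ring,
      PySem.List.pyRange_one_succ_right (by omega), List.foldl_append]
    simp only [List.foldl_cons, List.foldl_nil]
    obtain ⟨hlen, hrow⟩ := shape_foldl_setOne (PySem.List.pyRange 0 (n : Int) 1)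
      (fun _ => yy) (fun j => x + j) m
    rw [cell_aSetOne _ _ _ hyy (by omega) (by rw [hlen]; exact hyr)
      (by rw [hrow, hW]; omega) r c]
    rw [ih (by omega)]
    have hcn : ((x + (n : Int)).toNat : Int) = x + n := Int.toNat_of_nonneg (by omega)
    by_cases h1 : r = yy.toNat ∧ c = (x + (n : Int)).toNat
    · rw [if_pos h1, if_pos (by omega)]
    · rw [if_neg h1]
      by_cases h2 : r = yy.toNat ∧ x ≤ (c : Int) ∧ (c : Int) < x + n
      · rw [if_pos h2, if_pos (by omega)]
      · rw [if_neg h2, if_neg (by omega)]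

theorem cell_aMark (m : List (List Int)) (x y w h : Int) (Wn Hn : Nat) (hx : 0 ≤ x)
    (hy : 0 ≤ y) (hmH : m.length = Hn) (hyh : y + h ≤ (Hn : Int))
    (hW : ∀ i : Nat, i < m.length → rowLen m i = Wn) (hxw : x + w ≤ (Wn : Int)) (r c : Nat) :
    cell (aMark m x y w h) r c =
      if y ≤ (r : Int) ∧ (r : Int) < y + h ∧ x ≤ (c : Int) ∧ (c : Int) < x + w then 1
      else cell m r c := by
  unfold aMark
  by_cases hw : w ≤ 0
  · rw [PySem.List.pyRange_one_eq_nil hw]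
    have : ∀ l : List Int, ∀ mm : List (List Int),
        l.foldl (fun mm2 i => [].foldl (fun mm3 j => aSetOne mm3 (y + i) (x + j)) mm2) mm = mm := by
      intro l
      induction l with
      | nil => intro mm; rfl
      | cons a l ih => intro mm; simp only [List.foldl_cons, List.foldl_nil]; exact ih mm
    rw [this]
    rw [if_neg (by omega)]
  · push_neg at hw
    by_cases hh : h ≤ 0
    · rw [PySem.List.pyRange_one_eq_nil hh, List.foldl_nil, if_neg (by omega)]
    · push_neg at hh
      obtain ⟨nh, rfl⟩ : ∃ nh : Nat, h = (nh : Int) := ⟨h.toNat, (Int.toNat_of_nonneg (by omega)).symm⟩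
      obtain ⟨nw, rfl⟩ : ∃ nw : Nat, w = (nw : Int) := ⟨w.toNat, (Int.toNat_of_nonneg (by omega)).symm⟩
      clear hw hh
      induction nh with
      | zero => simp only [Nat.cast_zero, PySem.List.pyRange_one_eq_nil (le_refl 0), List.foldl_nil]
                rw [if_neg (by omega)]
      | succ nh ih =>
        rw [show ((nh + 1 : Nat) : Int) = (nh : Int) + 1 by push_cast; ring,
          PySem.List.pyRange_one_succ_right (by omega), List.foldl_append]
        simp only [List.foldl_cons, List.foldl_nil]
        set mprev := (PySem.List.pyRange 0 (nh : Int) 1).foldl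
          (fun mm i => (PySem.List.pyRange 0 (nw : Int) 1).foldl
            (fun mm2 j => aSetOne mm2 (y + i) (x + j)) mm) m with hmprev
        have hshape : mprev.length = m.length ∧ ∀ i : Nat, rowLen mprev i = rowLen m i := by
          rw [hmprev]; exact length_aMark m x y (nw : Int) (nh : Int)
        have hyn' : (y + (nh : Int)).toNat < m.length := by
          rw [hmH]; omega
        rw [cell_markRow nw mprev x (y + nh) Wn hx (by omega)
          (by rw [hshape.1]; exact hyn')
          ((hshape.2 _).trans (hW _ hyn')) hxw r c]
        rw [ih (by omega)]
        have hyn : ((y + (nh : Int)).toNat : Int) = y + nh := Int.toNat_of_nonneg (by omega)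
        by_cases h1 : r = (y + (nh : Int)).toNat ∧ x ≤ (c : Int) ∧ (c : Int) < x + nw
        · rw [if_pos h1, if_pos (by omega)]
        · rw [if_neg h1]
          by_cases h2 : y ≤ (r : Int) ∧ (r : Int) < y + nh ∧ x ≤ (c : Int) ∧ (c : Int) < x + nw
          · rw [if_pos h2, if_pos (by omega)]
          · rw [if_neg h2, if_neg (by omega)]

theorem ReprM_step (m : List (List Int)) (placed : List (Int × Int × Int × Int)) (W H x y w h : Int)
    (hR : ReprM m placed W H) (hx : 0 ≤ x) (hxW : x < W) (hxw : x + w ≤ W)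
    (hy : 0 ≤ y) (hyH : y < H) (hyh : y + h ≤ H) :
    ReprM (aMark m x y w h) (placed ++ [(x, y, w, h)]) W H := by
  obtain ⟨hlen, hrows, hcell⟩ := hR
  obtain ⟨glen, grows⟩ := length_aMark m x y w h
  refine ⟨glen.trans hlen, fun i hi => (grows i).trans (hrows i hi), ?_⟩
  intro r c hr hc
  have hWpos : (0:Int) < W := by omega
  have hHpos : (0:Int) < H := by omega
  have hWt : ((W.toNat : Int)) = W := Int.toNat_of_nonneg (by omega)
  have hHt : ((H.toNat : Int)) = H := Int.toNat_of_nonneg (by omega)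
  rw [cell_aMark m x y w h W.toNat H.toNat hx hy hlen (by omega)
    (fun i hi => hrows i (by omega)) (by omega) r c]
  rw [hcell r c hr hc]
  by_cases h1 : y ≤ (r : Int) ∧ (r : Int) < y + h ∧ x ≤ (c : Int) ∧ (c : Int) < x + w
  · rw [if_pos h1, if_pos ?_]
    refine ⟨(x, y, w, h), List.mem_append_right _ List.mem_cons_self, by simpa using by omega⟩
  · rw [if_neg h1]
    by_cases h2 : ∃ p ∈ placed, p.1 ≤ (c : Int) ∧ (c : Int) < p.1 + p.2.2.1 ∧
        p.2.1 ≤ (r : Int) ∧ (r : Int) < p.2.1 + p.2.2.2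
    · rw [if_pos h2, if_pos ?_]
      obtain ⟨p, hp, hcond⟩ := h2
      exact ⟨p, List.mem_append_left _ hp, hcond⟩
    · rw [if_neg h2, if_neg ?_]
      rintro ⟨p, hp, hcond⟩
      rcases List.mem_append.mp hp with hp | hp
      · exact h2 ⟨p, hp, hcond⟩
      · rcases List.mem_singleton.mp hp with rfl
        simp only at hcond
        exact h1 (by omega)

def bRightFold (placed : List (Int × Int × Int × Int)) (y init : Int) : Int :=
  placed.foldl (fun r p =>
    if p.2.1 ≤ y ∧ y < p.2.1 + p.2.2.2 ∧ 1 ≤ p.2.2.1 then max r (p.1 + p.2.2.1) else r) init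

theorem bRight_aux (placed : List (Int × Int × Int × Int)) (y : Int) (init : Int) :
    (init ≤ bRightFold placed y init) ∧
      (∀ p ∈ placed, (p.2.1 ≤ y ∧ y < p.2.1 + p.2.2.2 ∧ 1 ≤ p.2.2.1) →
        p.1 + p.2.2.1 ≤ bRightFold placed y init) ∧
      (bRightFold placed y init = init ∨ ∃ p ∈ placed,
        (p.2.1 ≤ y ∧ y < p.2.1 + p.2.2.2 ∧ 1 ≤ p.2.2.1) ∧
          bRightFold placed y init = p.1 + p.2.2.1) := by
  induction placed generalizing init with
  | nil => exact ⟨le_refl _, by simp, Or.inl rfl⟩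
  | cons q l ih =>
    have hstep : init ≤ (if q.2.1 ≤ y ∧ y < q.2.1 + q.2.2.2 ∧ 1 ≤ q.2.2.1
        then max init (q.1 + q.2.2.1) else init) := by
      split_ifs <;> omega
    obtain ⟨ih1, ih2, ih3⟩ := ih (if q.2.1 ≤ y ∧ y < q.2.1 + q.2.2.2 ∧ 1 ≤ q.2.2.1
        then max init (q.1 + q.2.2.1) else init)
    have hfold : bRightFold (q :: l) y init = bRightFold l y
        (if q.2.1 ≤ y ∧ y < q.2.1 + q.2.2.2 ∧ 1 ≤ q.2.2.1
          then max init (q.1 + q.2.2.1) else init) := rfl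
    refine ⟨hfold ▸ le_trans hstep ih1, ?_, ?_⟩
    · intro p hp hcond
      rw [hfold]
      rcases List.mem_cons.mp hp with rfl | hp
      · refine le_trans ?_ ih1
        rw [if_pos hcond]
        omega
      · exact ih2 p hp hcond
    · rw [hfold]
      by_cases hq : q.2.1 ≤ y ∧ y < q.2.1 + q.2.2.2 ∧ 1 ≤ q.2.2.1
      · rw [if_pos hq] at ih3 ⊢
        rcases ih3 with heq | ⟨p, hp, hcond, heq⟩
        · rcases max_choice init (q.1 + q.2.2.1) with hm | hm
          · exact Or.inl (heq.trans hm)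
          · exact Or.inr ⟨q, List.mem_cons_self, hq, heq.trans hm⟩
        · exact Or.inr ⟨p, List.mem_cons_of_mem _ hp, hcond, heq⟩
      · rw [if_neg hq] at ih3 ⊢
        rcases ih3 with heq | ⟨p, hp, hcond, heq⟩
        · exact Or.inl heq
        · exact Or.inr ⟨p, List.mem_cons_of_mem _ hp, hcond, heq⟩

theorem aTzGo_aux (row : List Int) (M : Nat)
    (hzero : ∀ c : Nat, M ≤ c → c < row.length → row[c]?.getD 0 = 0)
    (hone : 0 < M → row[M - 1]?.getD 0 ≠ 0) :
    ∀ n : Nat, M ≤ n → n ≤ row.length →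
      aTzGo row (PySem.List.pyRange ((n : Int) - 1) (-1) (-1)) = (n : Int) - M := by
  intro n
  induction n with
  | zero =>
    intro hMn _
    rw [PySem.List.pyRange_neg_one_eq_nil (by omega)]
    simp only [aTzGo]
    omega
  | succ n ih =>
    intro hMn hnl
    rw [show ((n + 1 : Nat) : Int) - 1 = (n : Int) by push_cast; ring,
      PySem.List.pyRange_neg_one_cons (by omega)]
    simp only [aTzGo]
    rw [PySem.List.pyGetD_natCast, List.getD_eq_getElem?_getD]
    by_cases hM : M ≤ n
    · rw [hzero n hM (by omega)]
      simp only [beq_self_eq_true, if_true]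
      rw [ih hM (by omega)]
      push_cast; ring
    · have hMeq : M = n + 1 := by omega
      have h1 := hone (by omega)
      rw [hMeq] at h1
      simp only [Nat.add_sub_cancel] at h1
      rw [if_neg (by simpa using h1)]
      omega

theorem countZeros_eq (m : List (List Int)) (placed : List (Int × Int × Int × Int)) (W H : Int)
    (hR : ReprM m placed W H) (hI : Inb placed W H) :
    aCountZeros m = bUsable placed W H := by
  obtain ⟨hlen, hrows, hcell⟩ := hR
  unfold aCountZeros bUsable
  rw [PySem.List.foldl_add, PySem.List.foldl_add]
  simp only [zero_add]
  congr 1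
  apply List.ext_getElem
  · rw [List.length_map, List.length_map, hlen, PySem.List.length_pyRange_one]
    omega
  · intro r h1 h2
    rw [List.length_map, hlen] at h1
    rw [List.getElem_map, List.getElem_map, PySem.List.getElem_pyRange_one]
    have hmr : m[r]? = some (m[r]'(by omega)) := List.getElem?_eq_getElem (by omega)
    set row := m[r]'(by omega) with hrow
    have hrl : row.length = W.toNat := by
      have := hrows r h1
      unfold rowLen at this
      rw [hmr] at this
      simpa using this
    have hcellrow : ∀ c : Nat, cell m r c = row[c]?.getD 0 := by
      intro c
      unfold cell
      rw [hmr]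
      rfl
    obtain ⟨hnn, hub, hcase⟩ := bRight_aux placed (r : Int) 0
    have hbr : bRightFold placed (r : Int) 0 = bRight placed ((0 : Int) + (r : Int)) := by
      rw [zero_add]; rfl
    set B := bRightFold placed (r : Int) 0 with hB
    have hBW : B ≤ max W 0 := by
      rcases hcase with heq | ⟨p, hp, hcond, heq⟩
      · omega
      · have := (hI p hp).2.2.1
        omega
    have hMcast : ((B.toNat : Int)) = B := Int.toNat_of_nonneg hnn
    have hWcast : ((W.toNat : Int)) = max W 0 := Int.toNat_eq_max W
    have hMlen : B.toNat ≤ row.length := by rw [hrl]; omega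
    have hzero : ∀ c : Nat, B.toNat ≤ c → c < row.length → row[c]?.getD 0 = 0 := by
      intro c hc1 hc2
      rw [← hcellrow, hcell r c h1 (by omega)]
      rw [if_neg]
      rintro ⟨p, hp, hpc1, hpc2, hpr1, hpr2⟩
      have := hub p hp ⟨hpr1, hpr2, by omega⟩
      omega
    have hone : 0 < B.toNat → row[B.toNat - 1]?.getD 0 ≠ 0 := by
      intro hpos
      rcases hcase with heq | ⟨p, hp, hcond, heq⟩
      · omega
      · have hpW := (hI p hp).2.2.1
        rw [← hcellrow, hcell r (B.toNat - 1) h1 (by omega)]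
        rw [if_pos]
        · omega
        · exact ⟨p, hp, by omega, by omega, hcond.1, hcond.2.1⟩
    have := aTzGo_aux row B.toNat hzero hone row.length hMlen (le_refl _)
    rw [this, hrl, hMcast, hWcast, hbr]

theorem step_inv (stA : List (Int × Int × Int × Int) × Int × List (List Int))
    (stB : List (Int × Int × Int × Int) × Int) (W H : Int) (item : Int × Int)
    (h : InvAB stA stB W H) : InvAB (aStep W H stA item) (bStep W H stB item) W H := by
  obtain ⟨h1, h2, hR, hI⟩ := h
  have hs := search_eq stB.1 W H item.1 item.2
  unfold aStep bStep
  rw [h1, hs]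
  cases hb : bFindY stB.1 W H item.1 item.2 (bXs stB.1) (bYs stB.1) with
  | none => exact ⟨h1, h2, hR, hI⟩
  | some yx =>
    simp only [Option.map_some]
    obtain ⟨hcf, _⟩ := B_spec_some stB.1 W H item.1 item.2 (y := yx.1) (x := yx.2)
      (by rw [hb])
    obtain ⟨_, _, hy0, hyH, hyhH, hx0, hxW, hxwW, hov⟩ := hcf
    rw [← h1]
    refine ⟨rfl, by simpa using h2, ?_, ?_⟩
    · exact ReprM_step _ stA.1 W H yx.2 yx.1 item.1 item.2 hR hx0 hxW hxwW hy0 hyH hyhH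
    · intro p hp
      rcases List.mem_append.mp hp with hp | hp
      · exact hI p hp
      · rcases List.mem_singleton.mp hp with rfl
        exact ⟨hx0, hxW, hxwW, hy0, hyH, hyhH⟩

theorem fold_inv (items : List (Int × Int)) (W H : Int)
    (stA : List (Int × Int × Int × Int) × Int × List (List Int))
    (stB : List (Int × Int × Int × Int) × Int) (h : InvAB stA stB W H) :
    InvAB (items.foldl (aStep W H) stA) (items.foldl (bStep W H) stB) W H := by
  induction items generalizing stA stB with
  | nil => exact h
  | cons it items ih =>
    simp only [List.foldl_cons]
    exact ih _ _ (step_inv stA stB W H it h)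

theorem init_inv (W H : Int) :
    InvAB ([], 0, List.replicate H.toNat (List.replicate W.toNat 0)) ([], 0) W H := by
  refine ⟨rfl, rfl, ⟨List.length_replicate, ?_, ?_⟩, by intro p hp; simp at hp⟩
  · intro i hi
    unfold rowLen
    rw [List.getElem?_replicate, if_pos (by simpa using hi)]
    simp
  · intro r c hr hc
    unfold cell
    rw [List.getElem?_replicate, if_pos (by simpa using hr)]
    simp only [Option.getD_some]
    rw [List.getElem?_replicate, if_pos (by simpa using hc)]
    simp

-- ===== VERDICT (by name: the statement is the Claim_ definition above) =====
theorem bin_pack_bl_spec : Claim_equal_bin_pack_bl := by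
  intro items cap _
  obtain ⟨h1, h2, hR, hI⟩ := fold_inv items cap.1 cap.2 _ _ (init_inv cap.1 cap.2)
  unfold Spec_bin_pack_bl
  simp only [bin_pack_bl, bin_pack_bl_alt]
  rw [h1, h2, countZeros_eq _ _ _ _ hR hI, h1]
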